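-- pv_equiv track=rewrite | github.com/ramires666/MT | src/domain/data/catalog_groups.py | mt5_group_path
-- ===== SOURCE A (Python) =====
-- def mt5_group_path(path: object | None) -> str:
--     raw = str(path or "").strip().replace("/", "\\")
--     parts = [part.strip() for part in raw.split("\\") if part.strip()]
--     if not parts:
--         return ""
--     if len(parts) == 1:
--         return parts[0]
--     return "\\".join(parts[:-1])
-- ===== SOURCE B (Python) =====
-- def mt5_group_path(path):
--     prefix, last = "", ""
--     for piece in str(path or "").strip().replace("/", "\\").split("\\"):
--         p = piece.strip()
--         if p:
--             if last:
--                 prefix = prefix + "\\" + last if prefix else last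
--             last = p
--     return prefix if prefix else last
-- ===== Notes on version B (the rewrite author's own statement) =====
-- stated objective: alternative
-- what changed: Replaces building the full parts list plus a three-branch return (empty / single / join of parts[:-1]) with a single streaming pass over the split pieces that maintains only the joined prefix and the last non-empty part, so no intermediate list and no slicing/join at the end.
import Mathlib
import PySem

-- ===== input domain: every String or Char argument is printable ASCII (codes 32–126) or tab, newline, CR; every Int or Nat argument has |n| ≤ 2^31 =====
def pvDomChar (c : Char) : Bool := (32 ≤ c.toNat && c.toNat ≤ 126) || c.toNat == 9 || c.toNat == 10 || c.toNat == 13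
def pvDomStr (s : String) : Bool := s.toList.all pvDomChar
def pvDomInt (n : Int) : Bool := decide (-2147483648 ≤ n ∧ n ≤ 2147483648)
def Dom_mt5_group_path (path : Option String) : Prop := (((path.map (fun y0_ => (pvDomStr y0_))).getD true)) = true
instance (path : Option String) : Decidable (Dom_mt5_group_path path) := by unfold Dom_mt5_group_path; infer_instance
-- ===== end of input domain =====

-- B replaces A's parts list plus three-branch return by one streaming pass keeping (joined prefix, last part); same return value everywhere.

-- ===== PORT A =====
def mt5_group_path (path : Option String) : String :=
  let raw := PySem.Str.replace (PySem.Str.strip (path.getD "")) "/" "\\"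
  let parts := ((PySem.Str.split? raw "\\").getD []).map PySem.Str.strip |>.filter (fun p => p ≠ "")
  if parts = [] then ""
  else if parts.length = 1 then (PySem.List.pyGet? parts 0).getD ""
  else PySem.Str.join "\\" (PySem.List.slice parts none (some (-1)))

-- ===== PORT B =====
-- the body of B's for-loop, as a named step function
def pvStepB (s : String × String) (piece : String) : String × String :=
  let p := PySem.Str.strip piece
  if p ≠ "" then
    ((if s.2 ≠ "" then (if s.1 ≠ "" then PySem.Str.join "\\" [s.1, s.2] else s.2) else s.1), p)
  else s

def mt5_group_path_alt (path : Option String) : String :=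
  let st := ((PySem.Str.split? (PySem.Str.replace (PySem.Str.strip (path.getD "")) "/" "\\") "\\").getD []).foldl
    pvStepB ("", "")
  if st.1 ≠ "" then st.1 else st.2

-- ===== PRECONDITION & SPEC =====
def Spec_mt5_group_path (path : Option String) (out : String) : Prop := out = mt5_group_path_alt path
instance (path : Option String) (out : String) : Decidable (Spec_mt5_group_path path out) := by unfold Spec_mt5_group_path; infer_instance

-- ===== CLAIM (what is proved, stated in full; the proofs are below) =====
def Claim_equal_mt5_group_path : Prop := ∀ (path : Option String), Dom_mt5_group_path path → Spec_mt5_group_path path (mt5_group_path path)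

-- ===== LEMMAS AND PROOFS =====

-- B's step restricted to already-stripped non-empty parts
def pvStep' (s : String × String) (p : String) : String × String :=
  ((if s.2 ≠ "" then (if s.1 ≠ "" then PySem.Str.join "\\" [s.1, s.2] else s.2) else s.1), p)

lemma pvFold_eq_fold' (L : List String) (acc : String × String) :
    L.foldl pvStepB acc
    = (((L.map PySem.Str.strip).filter (fun p => p ≠ "")).foldl pvStep' acc) := by
  induction L generalizing acc with
  | nil => rfl
  | cons h t ih =>
    rw [List.foldl_cons]
    by_cases hp : PySem.Str.strip h = ""
    · have h1 : pvStepB acc h = acc := by simp [pvStepB, hp]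
      have h2 : ((h :: t).map PySem.Str.strip).filter (fun p => p ≠ "")
          = (t.map PySem.Str.strip).filter (fun p => p ≠ "") := by simp [hp]
      rw [h1, h2, ih]
    · have h1 : pvStepB acc h = pvStep' acc (PySem.Str.strip h) := by
        simp [pvStepB, pvStep', hp]
      have h2 : ((h :: t).map PySem.Str.strip).filter (fun p => p ≠ "")
          = PySem.Str.strip h :: (t.map PySem.Str.strip).filter (fun p => p ≠ "") := by
        simp [hp]
      rw [h1, h2, List.foldl_cons, ih]

lemma pvJoin_ne_nil (sep : List Char) (c : List Char) (rest : List (List Char)) (hc : c ≠ []) :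
    PySem.Chars.join sep (c :: rest) ≠ [] := by
  cases rest with
  | nil => simpa [PySem.Chars.join_singleton] using hc
  | cons b t =>
    rw [PySem.Chars.join_cons_cons]
    rcases c with _ | ⟨x, xs⟩
    · exact absurd rfl hc
    · simp

lemma pvJoin_append_one (sep : List Char) (l : List (List Char)) (x : List Char) (hl : l ≠ []) :
    PySem.Chars.join sep (l ++ [x]) = PySem.Chars.join sep l ++ sep ++ x := by
  induction l with
  | nil => exact absurd rfl hl
  | cons a t ih =>
    cases t with
    | nil => simp [PySem.Chars.join_cons_cons, PySem.Chars.join_singleton]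
    | cons b u =>
      rw [List.cons_append, List.cons_append, PySem.Chars.join_cons_cons,
          ← List.cons_append, ih (by simp), PySem.Chars.join_cons_cons]
      simp

lemma pvStr_join_append_one (l : List String) (x : String) (hl : l ≠ []) :
    PySem.Str.join "\\" (l ++ [x])
      = PySem.Str.join "\\" [PySem.Str.join "\\" l, x] := by
  apply String.toList_injective
  simp only [PySem.Str.toList_join, List.map_append, List.map_cons, List.map_nil]
  rw [PySem.Chars.join_cons_cons, PySem.Chars.join_singleton,
      pvJoin_append_one _ _ _ (by simpa using hl)]

lemma pvStr_join_singleton (a : String) : PySem.Str.join "\\" [a] = a := by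
  apply String.toList_injective
  simp only [PySem.Str.toList_join, List.map_cons, List.map_nil]
  exact PySem.Chars.join_singleton _ _

lemma pvStr_join_ne_empty (l : List String) (hl : l ≠ []) (hne : ∀ p ∈ l, p ≠ "") :
    PySem.Str.join "\\" l ≠ "" := by
  intro h
  have h' : (PySem.Str.join "\\" l).toList = ("" : String).toList := by rw [h]
  rw [PySem.Str.toList_join] at h'
  cases l with
  | nil => exact hl rfl
  | cons a t =>
    have ha : a.toList ≠ [] := by
      intro hx
      exact hne a (by simp) (String.toList_injective (by simpa using hx))
    exact pvJoin_ne_nil _ _ _ ha (by simpa using h')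

-- characterization of the restricted fold on a list of non-empty parts
lemma pvFold'_char (ps : List String) (hne : ∀ p ∈ ps, p ≠ "") :
    ps.foldl pvStep' ("", "")
      = (if ps.dropLast = [] then "" else PySem.Str.join "\\" ps.dropLast,
         ps.getLastD "") := by
  induction ps using List.reverseRecOn with
  | nil => rfl
  | append_singleton l x ih =>
    have hne' : ∀ p ∈ l, p ≠ "" := fun p hp => hne p (by simp [hp])
    rw [List.foldl_append, ih hne', List.foldl_cons, List.foldl_nil]
    cases l with
    | nil => simp [pvStep']
    | cons a t =>
      have hmem : (a :: t).getLastD "" ∈ a :: t := by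
        rw [List.getLastD_eq_getLast?, List.getLast?_eq_some_getLast (l := a :: t) (by simp),
          Option.getD_some]
        exact List.getLast_mem _
      have hlast : (a :: t).getLastD "" ≠ "" := hne' _ hmem
      cases t with
      | nil =>
        simp [pvStep', pvStr_join_singleton]
      | cons b u =>
        have hdle : (a :: b :: u).dropLast ≠ [] := by simp
        have hjoin_ne : PySem.Str.join "\\" ((a :: b :: u).dropLast) ≠ "" := by
          apply pvStr_join_ne_empty _ hdle
          intro p hp
          exact hne' p (List.dropLast_subset _ hp)
        have hwhole : (a :: b :: u).dropLast ++ [(a :: b :: u).getLastD ""] = a :: b :: u := by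
          rw [List.getLastD_eq_getLast?, List.getLast?_eq_some_getLast (l := a :: b :: u) (by simp),
            Option.getD_some]
          exact List.dropLast_append_getLast _
        simp only [pvStep', hlast, hdle, hjoin_ne, ne_eq, not_false_eq_true, if_pos, if_neg, List.dropLast_concat, List.getLastD_concat]
        rw [← pvStr_join_append_one _ _ hdle, hwhole]
        simp

-- main equivalence, over an arbitrary list of pieces
lemma pv_core (L : List String) :
    (if ((L.map PySem.Str.strip).filter (fun p => p ≠ "")) = [] then ""
     else if ((L.map PySem.Str.strip).filter (fun p => p ≠ "")).length = 1 then
       (PySem.List.pyGet? ((L.map PySem.Str.strip).filter (fun p => p ≠ "")) 0).getD ""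
     else PySem.Str.join "\\" (PySem.List.slice ((L.map PySem.Str.strip).filter (fun p => p ≠ "")) none (some (-1))))
    = (if (L.foldl pvStepB ("", "")).1 ≠ "" then (L.foldl pvStepB ("", "")).1
       else (L.foldl pvStepB ("", "")).2) := by
  rw [pvFold_eq_fold']
  generalize h : (L.map PySem.Str.strip).filter (fun p => p ≠ "") = ps
  have hne : ∀ p ∈ ps, p ≠ "" := by
    rw [← h]; intro p hp; simpa using List.of_mem_filter hp
  rw [pvFold'_char ps hne]
  cases ps with
  | nil => simp
  | cons a t =>
    cases t with
    | nil => simp [PySem.List.pyGet?, PySem.List.pyIdx?]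
    | cons b u =>
      have hdl : (a :: b :: u).dropLast ≠ [] := by simp
      have hjoin_ne : PySem.Str.join "\\" ((a :: b :: u).dropLast) ≠ "" := by
        apply pvStr_join_ne_empty _ hdl
        intro p hp
        exact hne p (List.dropLast_subset _ hp)
      simp only [PySem.List.slice_to_neg_one]
      simp
      exact fun hc => absurd hc (by simpa using hjoin_ne)

theorem pv_main (path : Option String) : mt5_group_path path = mt5_group_path_alt path := by
  unfold mt5_group_path mt5_group_path_alt
  exact pv_core _

-- ===== VERDICT (by name: the statement is the Claim_ definition above) =====
theorem mt5_group_path_spec : Claim_equal_mt5_group_path := by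
  intro path _
  exact pv_main path
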